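-- pv_equiv track=rewrite | github.com/okara83/Becoming-a-Data-Scientist | Data Science and Machine Learning/Machine-Learning-In-Python-THOROUGH/EXAMPLES/EDABIT/EARLIER/05_oddly_or_evenly_positioned.py | char_at_pos
-- ===== SOURCE A (Python) =====
-- def char_at_pos(r, s):
--     a = []
--     for i in range(len(r)):
--         if s == "even":
--             if i %2:
--                 a.append(r[i])
--         elif s == "odd":
--             if not i%2:
--                 a.append(r[i])
--     if type(r) == str:
--         return("".join(a))
--     else: return(a)
-- ===== SOURCE B (Python) =====
-- def char_at_pos(r, s):
--     if s == "even":
--         start = 1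
--     elif s == "odd":
--         start = 0
--     else:
--         out = r[:0]
--         return out if type(r) == str else list(out)
--     out = r[start::2]
--     return out if type(r) == str else list(out)
-- ===== Notes on version B (the rewrite author's own statement) =====
-- stated objective: idiomatic
-- what changed: Replaces the per-index loop with a parity test inside by one branch on s that picks a start offset and a single extended slice r[start::2].
import Mathlib
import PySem

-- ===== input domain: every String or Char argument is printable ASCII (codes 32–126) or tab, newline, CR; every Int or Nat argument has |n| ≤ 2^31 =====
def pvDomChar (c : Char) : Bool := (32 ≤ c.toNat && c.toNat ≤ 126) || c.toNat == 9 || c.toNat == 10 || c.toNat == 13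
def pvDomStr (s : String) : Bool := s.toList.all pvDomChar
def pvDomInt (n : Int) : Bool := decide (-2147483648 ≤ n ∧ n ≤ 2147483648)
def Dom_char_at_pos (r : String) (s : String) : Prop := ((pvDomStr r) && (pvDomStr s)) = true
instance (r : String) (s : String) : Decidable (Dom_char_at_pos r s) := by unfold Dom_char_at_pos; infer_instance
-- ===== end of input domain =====

-- B replaces A's per-index loop with a branch on s picking a start offset and one extended slice r[start::2] (idiomatic).


-- ===== PORT A =====
-- loop over every index i of r; parity/s tests in A's branch order; r[i] in range via pyGet?
-- (the appended r[i] is a 1-char string; ported as the Char, so "".join(a) is String.ofList a)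
def char_at_pos (r : String) (s : String) : String :=
  let a : List Char := (List.range r.toList.length).foldl (fun (a : List Char) (i : Nat) =>
    if s == "even" then
      (if i % 2 ≠ 0 then a ++ (PySem.List.pyGet? r.toList (i : Int)).toList else a)
    else if s == "odd" then
      (if i % 2 = 0 then a ++ (PySem.List.pyGet? r.toList (i : Int)).toList else a)
    else a) []
  String.ofList a

-- ===== PORT B =====
-- branch on s to pick a start offset, then a single extended slice r[start::2] (step 2 ≠ 0, so always some)
def char_at_pos_alt (r : String) (s : String) : String :=
  if s == "even" then (PySem.Str.slice? r (some 1) none 2).getD ""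
  else if s == "odd" then (PySem.Str.slice? r (some 0) none 2).getD ""
  else PySem.Str.slice r none (some 0)

-- ===== PRECONDITION & SPEC =====
def Spec_char_at_pos (r : String) (s : String) (out : String) : Prop := out = char_at_pos_alt r s
instance (r : String) (s : String) (out : String) : Decidable (Spec_char_at_pos r s out) := by unfold Spec_char_at_pos; infer_instance

-- ===== CLAIM (what is proved, stated in full; the proofs are below) =====
def Claim_equal_char_at_pos : Prop := ∀ (r : String) (s : String), Dom_char_at_pos r s → Spec_char_at_pos r s (char_at_pos r s)

-- ===== LEMMAS AND PROOFS =====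

def everyOther : List Char → List Char
  | [] => []
  | [x] => [x]
  | x :: _ :: t => x :: everyOther t

theorem everyOther_cons (y : Char) (t : List Char) :
    everyOther (y :: t) = y :: everyOther (t.drop 1) := by
  cases t <;> simp [everyOther]

theorem flat_even_idx (L : List Char) :
    (List.range L.length).flatMap (fun i => if i % 2 = 0 then (L[i]?).toList else []) = everyOther L := by
  induction L using everyOther.induct with
  | case1 => simp [everyOther]
  | case2 x => simp [everyOther, List.range_succ]
  | case3 x y t ih =>
    have hL : (x :: y :: t).length = 2 + t.length := by simp only [List.length_cons]; omega
    have hfun : (fun i => if (2 + i) % 2 = 0 then (((x :: y :: t))[2 + i]?).toList else [])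
        = (fun i : Nat => if i % 2 = 0 then (t[i]?).toList else []) := by
      funext i
      have h2 : 2 + i = i + 1 + 1 := by omega
      rw [h2]
      have h1 : (i + 1 + 1) % 2 = i % 2 := by omega
      rw [h1, List.getElem?_cons_succ, List.getElem?_cons_succ]
    simp only [hL, List.range_add, List.flatMap_append, List.flatMap_map]
    rw [hfun, ih]
    rw [show List.range 2 = [0, 1] from rfl]
    simp [everyOther]

theorem flat_odd_idx (L : List Char) :
    (List.range L.length).flatMap (fun i => if i % 2 ≠ 0 then (L[i]?).toList else []) = everyOther (L.drop 1) := by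
  induction L using everyOther.induct with
  | case1 => simp [everyOther]
  | case2 x => simp [everyOther, List.range_succ]
  | case3 x y t ih =>
    have hL : (x :: y :: t).length = 2 + t.length := by simp only [List.length_cons]; omega
    have hfun : (fun i => if (2 + i) % 2 ≠ 0 then (((x :: y :: t))[2 + i]?).toList else [])
        = (fun i : Nat => if i % 2 ≠ 0 then (t[i]?).toList else []) := by
      funext i
      have h2 : 2 + i = i + 1 + 1 := by omega
      rw [h2]
      have h1 : (i + 1 + 1) % 2 = i % 2 := by omega
      rw [h1, List.getElem?_cons_succ, List.getElem?_cons_succ]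
    simp only [hL, List.range_add, List.flatMap_append, List.flatMap_map]
    rw [hfun, ih]
    rw [show List.range 2 = [0, 1] from rfl]
    simp [everyOther_cons]

theorem core_zero (L : List Char) :
    (List.range ((L.length + 1) / 2)).filterMap (fun k => L[2 * k]?) = everyOther L := by
  induction L using everyOther.induct with
  | case1 => simp [everyOther]
  | case2 x => simp [everyOther, List.range_succ]
  | case3 x y t ih =>
    have hc : ((x :: y :: t).length + 1) / 2 = (t.length + 1) / 2 + 1 := by
      simp only [List.length_cons]; omega
    have hfun : (fun k => ((x :: y :: t))[2 * (k + 1)]?) = (fun k : Nat => t[2 * k]?) := by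
      funext k
      have h : 2 * (k + 1) = 2 * k + 1 + 1 := by omega
      rw [h, List.getElem?_cons_succ, List.getElem?_cons_succ]
    have h0 : ((x :: y :: t))[2 * 0]? = some x := rfl
    rw [hc, List.range_succ_eq_map]
    simp only [List.filterMap_cons, h0, List.filterMap_map, Function.comp_def,
      Nat.succ_eq_add_one]
    rw [hfun, ih]
    simp [everyOther]

theorem core_one (L : List Char) :
    (List.range (L.length / 2)).filterMap (fun k => L[2 * k + 1]?) = everyOther (L.drop 1) := by
  induction L using everyOther.induct with
  | case1 => simp [everyOther]
  | case2 x => simp [everyOther]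
  | case3 x y t ih =>
    have hc : (x :: y :: t).length / 2 = t.length / 2 + 1 := by
      simp only [List.length_cons]; omega
    have hfun : (fun k => ((x :: y :: t))[2 * (k + 1) + 1]?) = (fun k : Nat => t[2 * k + 1]?) := by
      funext k
      have h : 2 * (k + 1) + 1 = 2 * k + 1 + 1 + 1 := by omega
      rw [h, List.getElem?_cons_succ, List.getElem?_cons_succ]
    have h0 : ((x :: y :: t))[2 * 0 + 1]? = some y := rfl
    rw [hc, List.range_succ_eq_map]
    simp only [List.filterMap_cons, h0, List.filterMap_map, Function.comp_def,
      Nat.succ_eq_add_one]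
    rw [hfun, ih]
    simp [everyOther_cons]

theorem slice?_two_zero (L : List Char) :
    PySem.List.slice? L (some 0) none 2 = some (everyOther L) := by
  rw [← core_zero]
  simp only [PySem.List.slice?, PySem.List.sliceIndices]
  norm_num
  have hidx : ∀ k : Nat, ((2 : Int) * (k : Int)).toNat = 2 * k := by intro k; omega
  simp only [hidx]
  have hcnt : (if 0 < L.length then (((L.length : Int) + 2 - 1) / 2).toNat else 0)
      = (L.length + 1) / 2 := by split <;> omega
  rw [hcnt]

theorem slice?_two_one (L : List Char) :
    PySem.List.slice? L (some 1) none 2 = some (everyOther (L.drop 1)) := by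
  rw [← core_one]
  simp only [PySem.List.slice?, PySem.List.sliceIndices]
  norm_num
  by_cases h0 : L.length = 0
  · simp [h0]
  · have hmin : min 1 (L.length : Int) = 1 := by omega
    rw [hmin]
    have hidx : ∀ k : Nat, ((1 : Int) + 2 * (k : Int)).toNat = 2 * k + 1 := by intro k; omega
    simp only [hidx]
    have hcnt : (if 1 < L.length then (((L.length : Int) - 1 + 2 - 1) / 2).toNat else 0)
        = L.length / 2 := by split <;> omega
    rw [hcnt]

-- ===== VERDICT (by name: the statement is the Claim_ definition above) =====
theorem char_at_pos_spec : Claim_equal_char_at_pos := by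
  intro r s _
  unfold Spec_char_at_pos char_at_pos char_at_pos_alt
  by_cases h1 : s = "even"
  · subst h1
    have e1 : (("even" : String) == "even") = true := rfl
    simp only [e1, if_true, PySem.List.pyGet?_natCast]
    rw [PySem.List.foldl_congr_mem _ _
      (fun a i => a ++ (if i % 2 ≠ 0 then (r.toList[i]?).toList else [])) _
      (by intro acc x _mem; simp only []; split_ifs with h <;> simp)]
    rw [PySem.List.foldl_append_eq_flatMap]
    simp only [List.nil_append, flat_odd_idx]
    simp only [PySem.Str.slice?, PySem.Chars.slice?_eq_listSlice?, slice?_two_one,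
      Option.map_some, Option.getD_some]
  · by_cases h2 : s = "odd"
    · subst h2
      have e1 : (("odd" : String) == "even") = false := rfl
      have e2 : (("odd" : String) == "odd") = true := rfl
      simp only [e1, e2, if_true, if_false, Bool.false_eq_true, PySem.List.pyGet?_natCast]
      rw [PySem.List.foldl_congr_mem _ _
        (fun a i => a ++ (if i % 2 = 0 then (r.toList[i]?).toList else [])) _
        (by intro acc x _mem; simp only []; split_ifs with h <;> simp)]
      rw [PySem.List.foldl_append_eq_flatMap]
      simp only [List.nil_append, flat_even_idx]
      simp only [PySem.Str.slice?, PySem.Chars.slice?_eq_listSlice?, slice?_two_zero,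
        Option.map_some, Option.getD_some]
    · have e1 : (s == "even") = false := by simp [h1]
      have e2 : (s == "odd") = false := by simp [h2]
      simp only [e1, e2, Bool.false_eq_true, if_false]
      simp [PySem.Str.slice, PySem.Chars.slice_eq_listSlice, PySem.List.slice_to,
        List.foldl_fixed]
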